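-- pv_equiv track=rewrite | github.com/Hayeong1224/Algorithm | 프로그래머스/2/84512. 모음 사전/모음 사전.py | solution
-- ===== SOURCE A (Python) =====
-- def solution(word):
--     # 5번째 자리: 가중치 1
--     # 4번째 자리: 가중치 6 (1 * 5 + 1)
--     # 3번째 자리: 가중치 31 (6 * 5 + 1)
--     # 2번째 자리: 가중치 156 (31 * 5 + 1)
--     # 1번째 자리: 가중치 781(156 * 5 + 1)
--
--     weights = [781, 156, 31, 6, 1]
--     vowels = "AEIOU"
--
--     ans = 0
--     for i in range(len(word)):
--         idx = vowels.index(word[i])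
--
--         ans += idx * weights[i] + 1
--
--     return ans
-- ===== SOURCE B (Python) =====
-- def solution(word):
--     # Build the whole vowel dictionary in lexicographic order by DFS,
--     # then look the word up.
--     words = []
--     def dfs(prefix):
--         if prefix:
--             words.append(prefix)
--         if len(prefix) < 5:
--             for v in "AEIOU":
--                 dfs(prefix + v)
--     dfs("")
--     return words.index(word) + 1
-- ===== Notes on version B (the rewrite author's own statement) =====
-- stated objective: alternative
-- what changed: Replaces the per-position weighted-sum closed form with explicit generation of the whole vowel dictionary in lexicographic order by DFS followed by a list lookup.
-- outside the precondition, e.g. on solution(''): A returns 0, B raises ValueError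
import Mathlib
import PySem

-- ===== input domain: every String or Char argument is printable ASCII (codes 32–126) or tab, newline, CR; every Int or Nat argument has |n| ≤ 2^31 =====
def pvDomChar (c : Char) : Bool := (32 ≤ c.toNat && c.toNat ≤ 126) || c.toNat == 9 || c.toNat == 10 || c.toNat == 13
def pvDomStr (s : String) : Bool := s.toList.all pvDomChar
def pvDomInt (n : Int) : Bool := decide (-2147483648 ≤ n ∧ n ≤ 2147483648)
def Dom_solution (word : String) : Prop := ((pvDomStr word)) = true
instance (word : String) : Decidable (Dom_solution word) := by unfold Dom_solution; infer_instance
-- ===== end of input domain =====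

-- B replaces A's weighted-sum closed form by generating the whole vowel dictionary
-- in lexicographic order (DFS) and looking the word up; same cost class in practice, objective: alternative.

def vowelsA : List Char := ['A', 'E', 'I', 'O', 'U']

-- ===== PORT A =====
-- literal port of A: foldl over range(len(word)); vowels.index / word[i] / weights[i]
-- raise outside Pre_solution, where the port's getD defaults are never reached.
def solution (word : String) : Int :=
  (List.range word.toList.length).foldl
    (fun ans i =>
      ans + (((PySem.List.index? vowelsA (word.toList.getD i ' ')).getD 0 : Nat) : Int)
              * (([781, 156, 31, 6, 1] : List Int).getD i 0) + 1) 0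

-- ===== PORT B =====
-- dfs(prefix): yield prefix (if nonempty), then recurse on prefix+v for v in "AEIOU"
-- while len(prefix) < 5; fuel = 5 - len(prefix).
def dfsB : List Char → Nat → List (List Char)
  | p, 0 => if p = [] then [] else [p]
  | p, n + 1 =>
      (if p = [] then [] else [p]) ++ vowelsA.flatMap (fun v => dfsB (p ++ [v]) n)

-- words.index(word) raises ValueError outside Pre_solution, where getD 0 is never reached.
def solution_alt (word : String) : Int :=
  (((PySem.List.index? (dfsB [] 5) word.toList).getD 0 : Nat) : Int) + 1

-- ===== PRECONDITION & SPEC =====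
-- Pre_ excludes the empty word (A returns 0 there but B's list lookup raises ValueError),
-- words longer than 5 (A raises IndexError) and words with a non-vowel character (A raises ValueError).
def Pre_solution (word : String) : Prop :=
  1 ≤ word.toList.length ∧ word.toList.length ≤ 5 ∧
    word.toList.all (fun c => decide (c ∈ vowelsA)) = true
instance (word : String) : Decidable (Pre_solution word) := by unfold Pre_solution; infer_instance

def pvWitness_solution : String := "EIO"

def Spec_solution (word : String) (out : Int) : Prop := out = solution_alt word
instance (word : String) (out : Int) : Decidable (Spec_solution word out) := by unfold Spec_solution; infer_instance

-- ===== CLAIM (what is proved, stated in full; the proofs are below) =====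
def Claim_equal_solution : Prop := ∀ (word : String), Dom_solution word → Pre_solution word → Spec_solution word (solution word)

-- ===== LEMMAS AND PROOFS =====

-- size of one DFS subtree with fuel n (Tfn 4 = 781, … — A's weights)
def Tfn : Nat → Nat
  | 0 => 1
  | n + 1 => 1 + 5 * Tfn n

-- rank of the word p ++ w inside dfsB p n (p nonempty)
def gfn : List Char → Nat → Nat
  | [], _ => 0
  | _ :: _, 0 => 0
  | c :: cs, n + 1 => 1 + ((PySem.List.index? vowelsA c).getD 0) * Tfn n + gfn cs n

theorem index?_append_not_mem {α : Type} [BEq α] [LawfulBEq α] (v : α) (xs ys : List α)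
    (h : v ∉ xs) :
    PySem.List.index? (xs ++ ys) v = (PySem.List.index? ys v).map (· + xs.length) := by
  simp only [PySem.List.index?_eq_idxOf?]
  induction xs with
  | nil => simp
  | cons a t ih =>
    simp only [List.mem_cons, not_or] at h
    simp [List.idxOf?_cons, ih h.2, Option.map_map, Ne.symm h.1,
      Function.comp, Nat.add_assoc, Nat.add_comm 1]

theorem dfs_length (n : Nat) : ∀ p : List Char, p ≠ [] → (dfsB p n).length = Tfn n := by
  induction n with
  | zero => intro p hp; simp [dfsB, hp, Tfn]
  | succ n ih =>
    intro p hp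
    simp [dfsB, hp, Tfn, vowelsA, List.flatMap_cons, ih, Nat.mul_succ]
    omega

theorem dfs_prefix (n : Nat) : ∀ p x, x ∈ dfsB p n → p <+: x := by
  induction n with
  | zero =>
    intro p x hx
    by_cases hp : p = [] <;> simp [dfsB, hp] at hx
    simp [hx]
  | succ n ih =>
    intro p x hx
    simp only [dfsB, List.mem_append, List.mem_flatMap] at hx
    rcases hx with hx | ⟨v, _, hx⟩
    · by_cases hp : p = [] <;> simp [hp] at hx <;> simp [hx]
    · exact (List.prefix_append p [v]).trans (ih (p ++ [v]) x hx)

theorem not_mem_dfs (n : Nat) (p : List Char) (v c : Char) (cs : List Char) (hvc : v ≠ c) :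
    p ++ c :: cs ∉ dfsB (p ++ [v]) n := by
  intro hmem
  obtain ⟨t, ht⟩ := dfs_prefix n (p ++ [v]) _ hmem
  rw [List.append_assoc] at ht
  have := List.append_cancel_left ht
  simp at this
  exact hvc this.1

-- rank of p ++ (c :: cs) inside the five concatenated subtrees, given the rank
-- inside a single subtree (IH at fuel n)
theorem flat_index (n : Nat)
    (IH : ∀ p w, p ≠ [] → w.length ≤ n → (∀ x ∈ w, x ∈ vowelsA) →
      PySem.List.index? (dfsB p n) (p ++ w) = some (gfn w n))
    (p : List Char) (c : Char) (cs : List Char)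
    (hc : c ∈ vowelsA) (hlen : cs.length ≤ n) (hall : ∀ x ∈ cs, x ∈ vowelsA) :
    PySem.List.index? (vowelsA.flatMap (fun v => dfsB (p ++ [v]) n)) (p ++ c :: cs)
      = some (((PySem.List.index? vowelsA c).getD 0) * Tfn n + gfn cs n) := by
  have key : ∀ v : Char, PySem.List.index? (dfsB (p ++ [v]) n) (p ++ c :: cs)
      = if v = c then some (gfn cs n) else none := by
    intro v
    by_cases hv : v = c
    · subst hv
      have := IH (p ++ [v]) cs (by simp) hlen hall
      simpa using this
    · rw [(PySem.List.index?_eq_none_iff _ _).2 (not_mem_dfs n p v c cs hv)]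
      simp [hv]
  have hmemc : ∀ v : Char, v = c → p ++ c :: cs ∈ dfsB (p ++ [v]) n := by
    intro v hv
    exact (PySem.List.index?_isSome_iff _ _).1 (by rw [key v]; simp [hv])
  have hlenA := dfs_length n (p ++ ['A']) (by simp)
  have hlenE := dfs_length n (p ++ ['E']) (by simp)
  have hlenI := dfs_length n (p ++ ['I']) (by simp)
  have hlenO := dfs_length n (p ++ ['O']) (by simp)
  fin_cases hc <;>
    simp only [vowelsA, List.flatMap_cons, List.flatMap_nil, List.append_nil]
  · -- c = 'A'
    rw [PySem.List.index?_append_of_mem _ (hmemc 'A' rfl), key 'A']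
    simp [PySem.List.index?_eq_idxOf?]
    exact Or.inl (by decide)
  · -- c = 'E'
    rw [index?_append_not_mem _ _ _ (not_mem_dfs n p 'A' 'E' cs (by decide)),
      PySem.List.index?_append_of_mem _ (hmemc 'E' rfl), key 'E']
    simp [hlenA, PySem.List.index?_eq_idxOf?, List.idxOf?_cons]
    omega
  · -- c = 'I'
    rw [index?_append_not_mem _ _ _ (not_mem_dfs n p 'A' 'I' cs (by decide)),
      index?_append_not_mem _ _ _ (not_mem_dfs n p 'E' 'I' cs (by decide)),
      PySem.List.index?_append_of_mem _ (hmemc 'I' rfl), key 'I']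
    simp [hlenA, hlenE, PySem.List.index?_eq_idxOf?, List.idxOf?_cons]
    omega
  · -- c = 'O'
    rw [index?_append_not_mem _ _ _ (not_mem_dfs n p 'A' 'O' cs (by decide)),
      index?_append_not_mem _ _ _ (not_mem_dfs n p 'E' 'O' cs (by decide)),
      index?_append_not_mem _ _ _ (not_mem_dfs n p 'I' 'O' cs (by decide)),
      PySem.List.index?_append_of_mem _ (hmemc 'O' rfl), key 'O']
    simp [hlenA, hlenE, hlenI, PySem.List.index?_eq_idxOf?, List.idxOf?_cons]
    omega
  · -- c = 'U'
    rw [index?_append_not_mem _ _ _ (not_mem_dfs n p 'A' 'U' cs (by decide)),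
      index?_append_not_mem _ _ _ (not_mem_dfs n p 'E' 'U' cs (by decide)),
      index?_append_not_mem _ _ _ (not_mem_dfs n p 'I' 'U' cs (by decide)),
      index?_append_not_mem _ _ _ (not_mem_dfs n p 'O' 'U' cs (by decide)),
      key 'U']
    simp [hlenA, hlenE, hlenI, hlenO, PySem.List.index?_eq_idxOf?, List.idxOf?_cons]
    omega

theorem dfs_index (n : Nat) : ∀ p w, p ≠ [] → w.length ≤ n → (∀ x ∈ w, x ∈ vowelsA) →
    PySem.List.index? (dfsB p n) (p ++ w) = some (gfn w n) := by
  induction n with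
  | zero =>
    intro p w hp hw _
    have : w = [] := List.eq_nil_of_length_eq_zero (Nat.le_zero.1 hw)
    subst this
    simp [dfsB, hp, gfn, PySem.List.index?_eq_idxOf?, List.idxOf?_cons]
  | succ n ih =>
    intro p w hp hw hall
    cases w with
    | nil =>
      simp [dfsB, hp, gfn, PySem.List.index?_eq_idxOf?, List.idxOf?_cons]
    | cons c cs =>
      have hne : p ≠ p ++ c :: cs := by
        intro h; have := congrArg List.length h; simp at this
      simp only [dfsB]
      rw [if_neg hp, List.singleton_append,
        PySem.List.index?_cons_of_ne _ hne,
        flat_index n ih p c cs (hall c (by simp)) (by simp at hw; omega)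
          (fun x hx => hall x (by simp [hx]))]
      simp [gfn]
      omega

-- A's foldl equals the rank function gfn at fuel 5
theorem A_list (l : List Char) (h1 : 1 ≤ l.length) (h5 : l.length ≤ 5) :
    (List.range l.length).foldl
      (fun ans i =>
        ans + (((PySem.List.index? vowelsA (l.getD i ' ')).getD 0 : Nat) : Int)
                * (([781, 156, 31, 6, 1] : List Int).getD i 0) + 1) 0 = (gfn l 5 : Int) := by
  rcases l with _ | ⟨a, _ | ⟨b, _ | ⟨c, _ | ⟨d, _ | ⟨e, _ | ⟨f, t⟩⟩⟩⟩⟩⟩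
  · simp at h1
  · simp [List.range_succ, gfn, Tfn]; ring
  · simp [List.range_succ, gfn, Tfn]; ring
  · simp [List.range_succ, gfn, Tfn]; ring
  · simp [List.range_succ, gfn, Tfn]; ring
  · simp [List.range_succ, gfn, Tfn]; ring
  · simp at h5; omega

-- ===== VERDICT (by name: the statement is the Claim_ definition above) =====
theorem solution_spec : Claim_equal_solution := by
  intro word _ hpre
  obtain ⟨h1, h5, hall'⟩ := hpre
  have hall : ∀ c ∈ word.toList, c ∈ vowelsA := by
    intro c hc; simpa using List.all_eq_true.1 hall' c hc
  show solution word = solution_alt word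
  have hA : solution word = (gfn word.toList 5 : Int) := A_list word.toList h1 h5
  have hB : solution_alt word
      = (((PySem.List.index? (dfsB [] 5) word.toList).getD 0 : Nat) : Int) + 1 := rfl
  rcases hl : word.toList with _ | ⟨c, cs⟩
  · rw [hl] at h1; simp at h1
  · rw [hl] at h1 h5 hall hA
    have htop : PySem.List.index? (dfsB [] 5) (c :: cs)
        = some (((PySem.List.index? vowelsA c).getD 0) * Tfn 4 + gfn cs 4) := by
      have := flat_index 4 (dfs_index 4) [] c cs (hall c (by simp))
        (by simp at h5; omega) (fun x hx => hall x (by simp [hx]))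
      simpa [dfsB] using this
    rw [hA, hB, hl, htop]
    simp [gfn]
    ring
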